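-- pv_equiv track=rewrite | github.com/knofler-rigor/Competitive-Programs | String Anagram.py | stringAnagram
-- ===== SOURCE A (Python) =====
-- def stringAnagram(dictionary, query):
--     dict={}
--     for s in dictionary:
--         i=str(sorted(s))
--         if i in dict:
--             dict[i]+=1
--         else:
--             dict[i]=1
--     ans=[]
--     for s in query:
--         i=str(sorted(s))
--         if i in dict:
--             ans.append(dict[i])
--         else:
--             ans.append(0)
--     return ans
-- ===== SOURCE B (Python) =====
-- def stringAnagram(dictionary, query):
--     ans = []
--     for s in query:
--         sig = str(sorted(s))
--         c = 0
--         for w in dictionary: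
--             if str(sorted(w)) == sig:
--                 c += 1
--         ans.append(c)
--     return ans
-- ===== Notes on version B (the rewrite author's own statement) =====
-- stated objective: simpler
-- what changed: Replaces the precomputed signature-frequency dictionary with a direct per-query scan of the dictionary that counts matching sorted-character signatures, maintaining no table.
import Mathlib
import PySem

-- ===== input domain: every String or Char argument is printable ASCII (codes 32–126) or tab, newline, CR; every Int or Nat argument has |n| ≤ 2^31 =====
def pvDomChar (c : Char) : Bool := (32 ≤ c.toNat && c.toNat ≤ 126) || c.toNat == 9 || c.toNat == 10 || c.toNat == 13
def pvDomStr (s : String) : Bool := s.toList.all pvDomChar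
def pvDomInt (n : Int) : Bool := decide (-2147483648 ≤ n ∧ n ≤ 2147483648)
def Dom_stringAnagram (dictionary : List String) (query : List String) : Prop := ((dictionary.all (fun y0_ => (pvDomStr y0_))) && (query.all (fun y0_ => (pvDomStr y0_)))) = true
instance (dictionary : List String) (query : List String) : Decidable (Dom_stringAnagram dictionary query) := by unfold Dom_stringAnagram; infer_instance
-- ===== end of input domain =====

-- B replaces A's build-a-frequency-dict-then-look-up strategy with a direct per-query scan
-- of the dictionary counting matching sorted-character signatures (objective: simpler, no table).

-- ===== PORT A =====
-- Python keys the dict by str(sorted(s)); str/repr is injective on lists of characters,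
-- so equality of those string keys coincides with equality of the sorted character lists:
-- the port uses the sorted character list itself as the key — exact on Dom.
def pvSig (s : String) : List Char := PySem.List.sorted s.toList (fun c => c) false

def stringAnagram (dictionary : List String) (query : List String) : List Int :=
  let d := dictionary.foldl (fun d s =>
    let i := pvSig s
    if d.contains i then d.insert i (d.getD i 0 + 1) else d.insert i 1)
    (PySem.Dict.empty : PySem.Dict (List Char) Int)
  query.foldl (fun ans s =>
    let i := pvSig s
    if d.contains i then ans ++ [d.getD i 0] else ans ++ [(0 : Int)]) []

-- ===== PORT B =====
def stringAnagram_alt (dictionary : List String) (query : List String) : List Int :=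
  query.foldl (fun ans s =>
    let sig := pvSig s
    ans ++ [dictionary.foldl (fun c w => if pvSig w = sig then c + 1 else c) (0 : Int)]) []

-- ===== PRECONDITION & SPEC =====
def Spec_stringAnagram (dictionary : List String) (query : List String) (out : List Int) : Prop := out = stringAnagram_alt dictionary query
instance (dictionary : List String) (query : List String) (out : List Int) : Decidable (Spec_stringAnagram dictionary query out) := by unfold Spec_stringAnagram; infer_instance

-- ===== CLAIM (what is proved, stated in full; the proofs are below) =====
def Claim_equal_stringAnagram : Prop := ∀ (dictionary : List String) (query : List String), Dom_stringAnagram dictionary query → Spec_stringAnagram dictionary query (stringAnagram dictionary query)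

-- ===== LEMMAS AND PROOFS =====

-- a loop 'for s in l: ans.append(f s)' is acc ++ l.map f
theorem foldl_append_map {α β : Type} (l : List α) (f : α → β) (acc : List β) :
    l.foldl (fun ans s => ans ++ [f s]) acc = acc ++ l.map f := by
  induction l generalizing acc with
  | nil => simp
  | cons x xs ih => simp [List.foldl, ih]

-- A's dict-building step is always insert (getD + 1)
theorem build_step_eq (d : PySem.Dict (List Char) Int) (s : String) :
    (if d.contains (pvSig s) then d.insert (pvSig s) (d.getD (pvSig s) 0 + 1)
     else d.insert (pvSig s) 1)
      = d.insert (pvSig s) (d.getD (pvSig s) 0 + 1) := by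
  by_cases h : d.contains (pvSig s) = true
  · simp [h]
  · simp only [Bool.not_eq_true] at h
    simp [h, PySem.Dict.getD_of_not_contains d 0 h]

-- the built dict is Counter(map sig dictionary)
theorem build_eq_counter (dictionary : List String) :
    dictionary.foldl (fun d s =>
        if d.contains (pvSig s) then d.insert (pvSig s) (d.getD (pvSig s) 0 + 1)
        else d.insert (pvSig s) 1)
      (PySem.Dict.empty : PySem.Dict (List Char) Int)
      = PySem.Dict.counter (dictionary.map pvSig) := by
  have h1 : dictionary.foldl (fun d s =>
        if d.contains (pvSig s) then d.insert (pvSig s) (d.getD (pvSig s) 0 + 1)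
        else d.insert (pvSig s) 1)
      (PySem.Dict.empty : PySem.Dict (List Char) Int)
      = dictionary.foldl (fun d s => d.insert (pvSig s) (d.getD (pvSig s) 0 + 1))
          PySem.Dict.empty := by
    apply PySem.List.foldl_congr_mem
    intro d s _
    exact build_step_eq d s
  rw [h1]
  have h2 := (List.foldl_map (f := pvSig)
    (g := fun (d : PySem.Dict (List Char) Int) i => d.insert i (d.getD i 0 + 1))
    (l := dictionary) (init := PySem.Dict.empty)).symm
  rw [h2]
  exact PySem.Dict.foldl_insert_getD_add_one_eq_counter _

-- B's inner scan counts the matching signatures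
theorem scan_counts (dictionary : List String) (v : List Char) (c : Int) :
    dictionary.foldl (fun c w => if pvSig w = v then c + 1 else c) c
      = c + ((List.count v (dictionary.map pvSig)) : Int) := by
  induction dictionary generalizing c with
  | nil => simp
  | cons x xs ih =>
    by_cases h : pvSig x = v
    · simp [List.foldl, h, ih]; ring
    · simp [List.foldl, h, ih]

theorem stringAnagram_eq_alt (dictionary query : List String) :
    stringAnagram dictionary query = stringAnagram_alt dictionary query := by
  unfold stringAnagram stringAnagram_alt
  simp only [build_eq_counter]
  have hA : ∀ s, (if (PySem.Dict.counter (dictionary.map pvSig)).contains (pvSig s) then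
        (PySem.Dict.counter (dictionary.map pvSig)).getD (pvSig s) 0 else (0 : Int))
      = ((List.count (pvSig s) (dictionary.map pvSig)) : Int) := by
    intro s
    by_cases h : (PySem.Dict.counter (dictionary.map pvSig)).contains (pvSig s) = true
    · simp [h, PySem.Dict.getD_counter]
    · simp only [Bool.not_eq_true] at h
      have h0 : ((List.count (pvSig s) (dictionary.map pvSig)) : Int) = 0 := by
        rw [← PySem.Dict.getD_counter]
        exact PySem.Dict.getD_of_not_contains _ 0 h
      simp [h, h0]
  have hfoldA : query.foldl (fun ans s =>
        if (PySem.Dict.counter (dictionary.map pvSig)).contains (pvSig s) then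
          ans ++ [(PySem.Dict.counter (dictionary.map pvSig)).getD (pvSig s) 0]
        else ans ++ [(0 : Int)]) ([] : List Int)
      = query.foldl (fun ans s =>
          ans ++ [((List.count (pvSig s) (dictionary.map pvSig)) : Int)]) [] := by
    apply PySem.List.foldl_congr_mem
    intro ans s _
    by_cases h : (PySem.Dict.counter (dictionary.map pvSig)).contains (pvSig s) = true <;>
      simp only [h, if_true, if_false, Bool.false_eq_true] <;> rw [← hA s] <;> simp [h]
  rw [hfoldA, foldl_append_map, foldl_append_map]
  simp [scan_counts]

-- ===== VERDICT (by name: the statement is the Claim_ definition above) =====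
theorem stringAnagram_spec : Claim_equal_stringAnagram := by
  intro dictionary query _
  exact stringAnagram_eq_alt dictionary query
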